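-- pv_equiv track=rewrite | github.com/pkepley/proj-e | python/prob111.py | kbits
-- ===== SOURCE A (Python) =====
-- import itertools
--
-- def kbits(n, k):
--     '''
--     ---------------------------------------------------------------------
--     kbits(n,k)
--     ---------------------------------------------------------------------
--     Generate list of all n-bit bit-patterns with exactly k bits set to 1.
--     '''
--     # https://stackoverflow.com/questions/1851134/generate-all-binary-strings-of-length-n-with-k-bits-set
--     result = []
--     for bits in itertools.combinations(range(n), k):
--         s = [ 0 ] * n
--         for bit in bits:
--             s[bit] = 1
--         result.append(s)
--     return result
-- ===== SOURCE B (Python) =====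
-- def kbits(n, k):
--     '''
--     Loop-only breadth-first enumeration: level holds (chain, next candidate
--     position) pairs, where chain is the reversed list of chosen set-bit
--     positions as nested 'cons' tuples so extension is O(1) and prefixes are
--     shared; each pass extends every chain by one more position (pruned so
--     every chain can still be completed), so after k passes level holds
--     exactly the k-element position sets in itertools.combinations'
--     lexicographic order; each chain is then unwound and expanded into its
--     bit row by concatenating zero runs.
--     Returns [] for k < 0 instead of raising.
--     '''
--     if k < 0:
--         return []
--     level = [((), 0)]
--     for j in range(k):
--         level = [((p, c), p + 1)
--                  for (c, lo) in level
--                  for p in range(lo, n - k + j + 1)]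
--     rows = []
--     for (c, _) in level:
--         row = [0] * n
--         while c:
--             row[c[0]] = 1
--             c = c[1]
--         rows.append(row)
--     return rows
-- ===== Notes on version B (the rewrite author's own statement) =====
-- stated objective: alternative
-- what changed: Replaces the itertools.combinations-of-positions loop by a loop-only breadth-first enumeration: one pass per set bit extends shared reversed position chains (pruned so every chain can be completed), then each chain is unwound into its bit row; the ascending extension order reproduces combinations' lexicographic order.
import Mathlib
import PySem

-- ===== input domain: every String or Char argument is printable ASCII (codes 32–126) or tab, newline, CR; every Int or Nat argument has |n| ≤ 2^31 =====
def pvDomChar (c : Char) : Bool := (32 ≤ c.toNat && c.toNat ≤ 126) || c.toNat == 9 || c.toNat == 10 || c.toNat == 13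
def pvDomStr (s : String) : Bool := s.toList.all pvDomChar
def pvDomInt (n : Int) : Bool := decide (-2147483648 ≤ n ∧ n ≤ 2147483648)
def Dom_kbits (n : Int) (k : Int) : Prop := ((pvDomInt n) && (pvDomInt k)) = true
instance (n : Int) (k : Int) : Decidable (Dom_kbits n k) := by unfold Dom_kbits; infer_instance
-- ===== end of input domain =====

-- B replaces the itertools.combinations loop by a loop-only breadth-first extension of
-- shared position chains, one pass per set bit, same output order; objective: alternative.

-- ===== PORT A =====
-- itertools.combinations(xs, k) in Python's lexicographic order (xs has no duplicates here)
def pvCombos : List Int → Nat → List (List Int)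
  | _, 0 => [[]]
  | [], _ + 1 => []
  | x :: xs, j + 1 => ((pvCombos xs j).map (fun c => x :: c)) ++ pvCombos xs (j + 1)

-- the inner loop: s = [0]*n; for bit in bits: s[bit] = 1   (bits are in-range, non-negative)
def pvRow (n : Nat) (bits : List Int) : List Int :=
  bits.foldl (fun s b => s.set b.toNat 1) (List.replicate n 0)

def kbits (n : Int) (k : Int) : List (List Int) :=
  (pvCombos (PySem.List.pyRange 0 n 1) k.toNat).map (pvRow n.toNat)

-- ===== PORT B =====
-- Source B's chains (() nil, (p, rest) cons) are List Int here: () ↦ [], (p, c) ↦ p :: c.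
-- level is the (chain, next candidate) pairs; the final while loop 'row[c[0]] = 1; c = c[1]'
-- is the foldl over the chain (an in-range write, positions lie in [0, n), so .set is exact).
def kbits_alt (n : Int) (k : Int) : List (List Int) :=
  if k < 0 then []
  else
    let level := (PySem.List.pyRange 0 k 1).foldl
      (fun lvl j => lvl.flatMap (fun cl =>
        (PySem.List.pyRange cl.2 (n - k + j + 1) 1).map (fun p => (p :: cl.1, p + 1))))
      [(([] : List Int), (0 : Int))]
    level.map (fun cl => cl.1.foldl (fun row p => row.set p.toNat 1) (List.replicate n.toNat 0))

-- ===== PRECONDITION & SPEC =====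
-- Pre_ excludes exactly k < 0, where Python's itertools.combinations raises ValueError.
def Pre_kbits (n : Int) (k : Int) : Prop := 0 ≤ k
instance (n : Int) (k : Int) : Decidable (Pre_kbits n k) := by unfold Pre_kbits; infer_instance
def pvWitness_kbits : Int × Int := (4, 2)

def Spec_kbits (n : Int) (k : Int) (out : List (List Int)) : Prop := out = kbits_alt n k
instance (n : Int) (k : Int) (out : List (List Int)) : Decidable (Spec_kbits n k out) := by unfold Spec_kbits; infer_instance

-- ===== CLAIM (what is proved, stated in full; the proofs are below) =====
def Claim_equal_kbits : Prop := ∀ (n : Int) (k : Int), Dom_kbits n k → Pre_kbits n k → Spec_kbits n k (kbits n k)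

-- ===== LEMMAS AND PROOFS =====

-- combinations of a too-short list are empty
lemma pvCombos_short (xs : List Int) (j : Nat) (h : xs.length < j) : pvCombos xs j = [] := by
  induction xs generalizing j with
  | nil =>
    cases j with
    | zero => omega
    | succ j => rfl
  | cons x xs ih =>
    cases j with
    | zero => omega
    | succ j =>
      simp only [List.length_cons] at h
      simp [pvCombos, ih j (by omega), ih (j + 1) (by omega)]

-- peeling the first chosen position off a combination of a range
lemma pvCombos_range_step (n : Int) (j : Nat) (d : Nat) :
    ∀ lo, (n - lo).toNat ≤ d →
      pvCombos (PySem.List.pyRange lo n 1) (j + 1)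
        = (PySem.List.pyRange lo (n - j) 1).flatMap
            (fun p => (pvCombos (PySem.List.pyRange (p + 1) n 1) j).map (fun c => p :: c)) := by
  induction d with
  | zero =>
    intro lo hd
    rw [PySem.List.pyRange_one_eq_nil (by omega : n - (j:Int) ≤ lo), List.flatMap_nil]
    exact pvCombos_short _ _ (by rw [PySem.List.length_pyRange_one]; omega)
  | succ d ih =>
    intro lo hd
    by_cases hroom : n - (j : Int) ≤ lo
    · rw [PySem.List.pyRange_one_eq_nil hroom, List.flatMap_nil]
      exact pvCombos_short _ _ (by rw [PySem.List.length_pyRange_one]; omega)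
    · have hlo : lo < n := by omega
      rw [PySem.List.pyRange_one_cons hlo, PySem.List.pyRange_one_cons (by omega : lo < n - (j:Int))]
      simp only [pvCombos, List.flatMap_cons]
      congr 1
      exact ih (lo + 1) (by omega)

-- writing constant 1s commutes, so scattering a reversed position list is the same scatter
lemma pvScatter_comm (l : List Int) (s : List Int) (b : Int) :
    l.foldl (fun s b => s.set b.toNat 1) (s.set b.toNat 1)
      = (l.foldl (fun s b => s.set b.toNat 1) s).set b.toNat 1 := by
  induction l generalizing s b with
  | nil => rfl
  | cons x l ih =>
    simp only [List.foldl_cons]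
    rw [show (s.set b.toNat 1).set x.toNat 1 = (s.set x.toNat 1).set b.toNat 1 by
      by_cases hbx : b.toNat = x.toNat
      · rw [hbx, List.set_set]
      · exact List.set_comm 1 1 hbx]
    exact ih _ _

lemma pvScatter_reverse (l : List Int) (s : List Int) :
    l.reverse.foldl (fun s b => s.set b.toNat 1) s = l.foldl (fun s b => s.set b.toNat 1) s := by
  induction l generalizing s with
  | nil => rfl
  | cons x l ih =>
    simp only [List.reverse_cons, List.foldl_append, List.foldl_cons, List.foldl_nil, ih,
               List.foldl_cons]
    exact (pvScatter_comm l s x).symm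

-- the breadth-first passes, counted by remaining set bits
def pvLevel (n : Int) : Nat → List (List Int × Int) → List (List Int × Int)
  | 0, S => S
  | r + 1, S => pvLevel n r (S.flatMap (fun cl =>
      (PySem.List.pyRange cl.2 (n - ((r : Int) + 1) + 1) 1).map (fun p => (p :: cl.1, p + 1))))

lemma pvLevel_append (n : Int) (r : Nat) :
    ∀ (S1 S2 : List (List Int × Int)),
      pvLevel n r (S1 ++ S2) = pvLevel n r S1 ++ pvLevel n r S2 := by
  induction r with
  | zero => intro S1 S2; rfl
  | succ r ih =>
    intro S1 S2
    simp only [pvLevel, List.flatMap_append]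
    exact ih _ _

lemma pvLevel_nil (n : Int) (r : Nat) : pvLevel n r [] = [] := by
  induction r with
  | zero => rfl
  | succ r ih =>
    show pvLevel n r (([] : List (List Int × Int)).flatMap _) = []
    rw [List.flatMap_nil]
    exact ih

lemma pvLevel_flat (n : Int) (r : Nat) :
    ∀ (S : List (List Int × Int)),
      pvLevel n r S = S.flatMap (fun cl => pvLevel n r [cl]) := by
  intro S
  induction S with
  | nil => rw [pvLevel_nil, List.flatMap_nil]
  | cons cl S ih =>
    rw [show cl :: S = [cl] ++ S from rfl, pvLevel_append, ih, List.flatMap_append]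
    congr 1
    simp

-- a single chain expands to all completions, in lexicographic order
lemma pvLevel_single (n : Int) (r : Nat) :
    ∀ (lo : Int) (pre : List Int),
      (pvLevel n r [(pre, lo)]).map Prod.fst
        = (pvCombos (PySem.List.pyRange lo n 1) r).map (fun c => c.reverse ++ pre) := by
  induction r with
  | zero => intro lo pre; simp [pvLevel, pvCombos]
  | succ r ih =>
    intro lo pre
    show (pvLevel n r _).map Prod.fst = _
    rw [List.flatMap_cons, List.flatMap_nil, List.append_nil, pvLevel_flat, List.flatMap_map,
        List.map_flatMap]
    rw [pvCombos_range_step n r (n - lo).toNat lo (le_refl _),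
        show n - ((r : Int) + 1) + 1 = n - r by ring, List.map_flatMap]
    congr 1
    funext p
    rw [ih (p + 1) (p :: pre), List.map_map]
    apply List.map_congr_left
    intro c _
    simp

-- the port's fold over range(k) computes the passes
lemma pvFold_level (n k : Int) (r : Nat) :
    ∀ (S : List (List Int × Int)), k - (r : Int) ≤ k →
      (PySem.List.pyRange (k - (r : Int)) k 1).foldl
        (fun lvl j => lvl.flatMap (fun cl =>
          (PySem.List.pyRange cl.2 (n - k + j + 1) 1).map (fun p => (p :: cl.1, p + 1)))) S
      = pvLevel n r S := by
  induction r with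
  | zero =>
    intro S _
    rw [PySem.List.pyRange_one_eq_nil (by omega)]
    rfl
  | succ r ih =>
    intro S _
    push_cast
    rw [PySem.List.pyRange_one_cons (by omega : k - ((r : Int) + 1) < k), List.foldl_cons,
        show k - ((r : Int) + 1) + 1 = k - (r : Int) by ring]
    rw [ih _ (by omega)]
    show pvLevel n r _ = _
    rw [show n - k + (k - ((r : Int) + 1)) + 1 = n - ((r : Int) + 1) + 1 by ring]
    rfl

-- ===== VERDICT (by name: the statement is the Claim_ definition above) =====
theorem kbits_spec : Claim_equal_kbits := by
  intro n k _ hk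
  have hk' : (0:Int) ≤ k := hk
  unfold Spec_kbits kbits kbits_alt
  rw [if_neg (by omega : ¬ k < 0)]
  show (pvCombos (PySem.List.pyRange 0 n 1) k.toNat).map (pvRow n.toNat)
      = ((PySem.List.pyRange 0 k 1).foldl
          (fun lvl j => lvl.flatMap (fun cl =>
            (PySem.List.pyRange cl.2 (n - k + j + 1) 1).map (fun p => (p :: cl.1, p + 1))))
          [(([] : List Int), (0 : Int))]).map
          (fun cl => cl.1.foldl (fun row p => row.set p.toNat 1) (List.replicate n.toNat 0))
  rw [show PySem.List.pyRange 0 k 1 = PySem.List.pyRange (k - (k.toNat : Int)) k 1 by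
        rw [show k - (k.toNat : Int) = 0 by omega],
      pvFold_level n k k.toNat _ (by omega)]
  have hsplit : ∀ (X : List (List Int × Int)) (g : List Int → List Int),
      X.map (fun cl => g cl.1) = (X.map Prod.fst).map g := by
    intro X g; rw [List.map_map]; rfl
  rw [hsplit, pvLevel_single n k.toNat 0 [], List.map_map]
  apply List.map_congr_left
  intro c _
  show pvRow n.toNat c = (c.reverse ++ []).foldl _ _
  rw [List.append_nil, pvScatter_reverse]
  rfl
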